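-- pv_equiv track=rewrite | github.com/bkovitz/lsd-challenge | adam/lsd/util/string.py | split_at_depth
-- ===== SOURCE A (Python) =====
-- def split_at_depth(s: str, sep: str = " ") -> list[str]:
--     """
--     Splits a string by separator (not between brackets). Useful for parsing.
--     >>> split_at_depth('[a b] [c d]')
--     ['[a b]', '[c d]']
--     """
--     parts = []
--     depth = 0
--     buf = []
--     i = 0
--     while i < len(s):
--         char = s[i]
--
--         if char in "[(":
--             depth += 1
--             buf.append(char)
--             i += 1
--             continue
--         elif char in ")]":
--             depth -= 1
--             buf.append(char)
--             i += 1
--             continue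
--
--         if depth == 0 and s.startswith(sep, i):
--             part = "".join(buf).strip()
--             if part:
--                 parts.append(part)
--             buf = []
--             i += len(sep)
--         else:
--             buf.append(char)
--             i += 1
--
--     if buf:
--         parts.append("".join(buf).strip())
--
--     return parts
-- ===== SOURCE B (Python) =====
-- def split_at_depth(s: str, sep: str = " ") -> list[str]:
--     # Index-then-slice: first pass records depth-0 separator cut positions,
--     # second pass slices the string between cuts (no running char buffer).
--     n = len(s)
--     step = len(sep)
--     cuts = []
--     depth = 0
--     i = 0
--     while i < n:
--         c = s[i]
--         if c in "[(":
--             depth += 1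
--             i += 1
--         elif c in ")]":
--             depth -= 1
--             i += 1
--         elif depth == 0 and s.startswith(sep, i):
--             cuts.append(i)
--             i += step
--         else:
--             i += 1
--     parts = []
--     start = 0
--     for cut in cuts:
--         seg = s[start:cut].strip()
--         if seg:
--             parts.append(seg)
--         start = cut + step
--     tail = s[start:]
--     if tail:
--         parts.append(tail.strip())
--     return parts
-- ===== Notes on version B (the rewrite author's own statement) =====
-- stated objective: alternative
-- what changed: B replaces A's running character buffer with an index-then-slice decomposition: one pass records the depth-0 separator cut positions, a second pass slices the string between consecutive cuts and strips the segments.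
import Mathlib
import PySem

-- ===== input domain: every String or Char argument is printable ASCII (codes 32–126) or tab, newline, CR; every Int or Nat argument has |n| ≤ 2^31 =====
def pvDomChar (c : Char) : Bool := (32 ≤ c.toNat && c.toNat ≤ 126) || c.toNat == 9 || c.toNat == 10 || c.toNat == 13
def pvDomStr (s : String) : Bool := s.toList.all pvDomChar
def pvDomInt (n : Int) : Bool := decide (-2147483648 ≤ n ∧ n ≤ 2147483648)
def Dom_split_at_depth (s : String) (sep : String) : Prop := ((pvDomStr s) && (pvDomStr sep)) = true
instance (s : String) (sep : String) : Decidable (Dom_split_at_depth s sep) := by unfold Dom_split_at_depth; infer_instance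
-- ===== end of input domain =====

-- B changes the decomposition (cut indices + slicing instead of a running buffer); equivalence is on return values only.

-- ===== PORT A =====
-- A's while loop; fuel = |s|+1 suffices since under Pre_ every iteration advances i by ≥ 1
-- (the fuel-0 case is unreachable under Pre_).
def splitA_loop (cs sepL : List Char) : Nat → Nat → Int → List Char → List String → List String
  | 0, _, _, _, parts => parts
  | fuel+1, i, depth, buf, parts =>
    match cs[i]? with
    | some c =>
      if c = '[' ∨ c = '(' then
        splitA_loop cs sepL fuel (i+1) (depth+1) (buf ++ [c]) parts
      else if c = ')' ∨ c = ']' then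
        splitA_loop cs sepL fuel (i+1) (depth-1) (buf ++ [c]) parts
      else if depth = 0 ∧ PySem.Chars.startswith (cs.drop i) sepL then
        let part := PySem.Chars.strip buf
        splitA_loop cs sepL fuel (i + sepL.length) depth []
          (if part ≠ [] then parts ++ [String.ofList part] else parts)
      else
        splitA_loop cs sepL fuel (i+1) depth (buf ++ [c]) parts
    | none =>
      if buf ≠ [] then parts ++ [String.ofList (PySem.Chars.strip buf)] else parts

def split_at_depth (s : String) (sep : String) : List String :=
  splitA_loop s.toList sep.toList (s.toList.length + 1) 0 0 [] []

-- ===== PORT B =====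
-- first pass: record depth-0 separator positions (same fuel discipline as A's loop)
def splitB_scan (cs sepL : List Char) : Nat → Nat → Int → List Nat → List Nat
  | 0, _, _, cuts => cuts
  | fuel+1, i, depth, cuts =>
    match cs[i]? with
    | some c =>
      if c = '[' ∨ c = '(' then
        splitB_scan cs sepL fuel (i+1) (depth+1) cuts
      else if c = ')' ∨ c = ']' then
        splitB_scan cs sepL fuel (i+1) (depth-1) cuts
      else if depth = 0 ∧ PySem.Chars.startswith (cs.drop i) sepL then
        splitB_scan cs sepL fuel (i + sepL.length) depth (cuts ++ [i])
      else
        splitB_scan cs sepL fuel (i+1) depth cuts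
    | none => cuts

-- body of Source B's `for cut in cuts` loop, state = (parts, start)
def splitB_step (cs sepL : List Char) (acc : List String × Nat) (cut : Nat) : List String × Nat :=
  let seg := PySem.Chars.strip ((cs.drop acc.2).take (cut - acc.2))
  ((if seg ≠ [] then acc.1 ++ [String.ofList seg] else acc.1), cut + sepL.length)

-- the code after Source B's loop: append the stripped tail iff the raw tail is nonempty
def splitB_finish (cs : List Char) (p : List String × Nat) : List String :=
  let tail := cs.drop p.2
  if tail ≠ [] then p.1 ++ [String.ofList (PySem.Chars.strip tail)] else p.1

def split_at_depth_alt (s : String) (sep : String) : List String :=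
  let cs := s.toList
  let sepL := sep.toList
  let cuts := splitB_scan cs sepL (cs.length + 1) 0 0 []
  splitB_finish cs (cuts.foldl (splitB_step cs sepL) ([], 0))

-- ===== PRECONDITION & SPEC =====
-- Pre_ excludes exactly the inputs where the Python A (and B) loops forever: an empty separator
-- together with some non-bracket character in s (there i never advances); A returns no value on them.
def Pre_split_at_depth (s : String) (sep : String) : Prop :=
  sep ≠ "" ∨ ∀ c ∈ s.toList, c = '[' ∨ c = '(' ∨ c = ')' ∨ c = ']'
instance (s : String) (sep : String) : Decidable (Pre_split_at_depth s sep) := by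
  unfold Pre_split_at_depth; infer_instance

def pvWitness_split_at_depth : String × String := ("[a b] [c d]", " ")

def Spec_split_at_depth (s : String) (sep : String) (out : List String) : Prop := out = split_at_depth_alt s sep
instance (s : String) (sep : String) (out : List String) : Decidable (Spec_split_at_depth s sep out) := by unfold Spec_split_at_depth; infer_instance

-- ===== CLAIM (what is proved, stated in full; the proofs are below) =====
def Claim_equal_split_at_depth : Prop := ∀ (s : String) (sep : String), Dom_split_at_depth s sep → Pre_split_at_depth s sep → Spec_split_at_depth s sep (split_at_depth s sep)

-- ===== LEMMAS AND PROOFS =====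

theorem scan_acc (cs sepL : List Char) (fuel : Nat) :
    ∀ i depth cuts, splitB_scan cs sepL fuel i depth cuts
      = cuts ++ splitB_scan cs sepL fuel i depth [] := by
  induction fuel with
  | zero => intro i depth cuts; simp [splitB_scan]
  | succ fuel ih =>
    intro i depth cuts
    simp only [splitB_scan]
    cases h : cs[i]? with
    | none => simp
    | some c =>
      dsimp only
      split_ifs with h1 h2 h3
      · exact ih _ _ _
      · exact ih _ _ _
      · rw [ih _ _ (cuts ++ [i]), ih _ _ ([] ++ [i])]
        simp
      · exact ih _ _ _

theorem loop_eq (cs sepL : List Char)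
    (H : sepL ≠ [] ∨ ∀ c ∈ cs, c = '[' ∨ c = '(' ∨ c = ')' ∨ c = ']') :
    ∀ fuel i depth (parts : List String) start, start ≤ i → cs.length - i < fuel →
      splitA_loop cs sepL fuel i depth ((cs.drop start).take (i - start)) parts
        = splitB_finish cs ((splitB_scan cs sepL fuel i depth []).foldl
            (splitB_step cs sepL) (parts, start)) := by
  intro fuel
  induction fuel with
  | zero => intro i depth parts start h1 h2; omega
  | succ fuel ih =>
    intro i depth parts start h1 h2
    simp only [splitA_loop, splitB_scan]
    cases h : cs[i]? with
    | none =>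
      have hlen : cs.length ≤ i := by
        rcases Nat.lt_or_ge i cs.length with hl | hg
        · simp [List.getElem?_eq_getElem hl] at h
        · exact hg
      have hbuf : (cs.drop start).take (i - start) = cs.drop start := by
        apply List.take_of_length_le; simp; omega
      rw [hbuf]
      simp [splitB_finish]
    | some c =>
      have hi : i < cs.length := by
        by_contra hn
        rw [List.getElem?_eq_none (by omega)] at h
        cases h
      have hc : cs[i] = c := by
        rw [List.getElem?_eq_getElem hi] at h; exact Option.some.inj h
      have hbufsucc : (cs.drop start).take (i - start) ++ [c] = (cs.drop start).take (i + 1 - start) := by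
        have he : i + 1 - start = (i - start) + 1 := by omega
        rw [he, List.take_add_one, List.getElem?_drop]
        have he2 : start + (i - start) = i := by omega
        rw [he2, h]
        rfl
      have hcut : ∀ P, P = (if PySem.Chars.strip ((cs.drop start).take (i - start)) ≠ [] then
              parts ++ [String.ofList (PySem.Chars.strip ((cs.drop start).take (i - start)))]
            else parts) →
          (c = '[' ∨ c = '(') = False → (c = ')' ∨ c = ']') = False →
          splitA_loop cs sepL fuel (i + sepL.length) depth [] P
            = splitB_finish cs ((splitB_scan cs sepL fuel (i + sepL.length) depth ([] ++ [i])).foldl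
                (splitB_step cs sepL) (parts, start)) := by
        intro P hP hnb1 hnb2
        have hsep : sepL ≠ [] := by
          rcases H with hs | hall
          · exact hs
          · exfalso
            have hmem : c ∈ cs := hc ▸ List.getElem_mem hi
            rcases hall c hmem with h' | h' | h' | h' <;> simp [h'] at hnb1 hnb2
        have hsl : 0 < sepL.length := List.length_pos_iff.mpr hsep
        rw [scan_acc cs sepL fuel (i + sepL.length) depth ([] ++ [i])]
        simp only [List.nil_append, List.singleton_append, List.foldl_cons]
        have hstep : splitB_step cs sepL (parts, start) i
            = (P, i + sepL.length) := by rw [hP]; rfl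
        rw [hstep]
        have hrec := ih (i + sepL.length) depth P (i + sepL.length) (le_refl _) (by omega)
        simp only [Nat.sub_self, List.take_zero] at hrec
        exact hrec
      dsimp only
      split_ifs with h1' h2' h3' hp
      · rw [hbufsucc]; exact ih (i+1) _ parts start (by omega) (by omega)
      · rw [hbufsucc]; exact ih (i+1) _ parts start (by omega) (by omega)
      · exact hcut _ (by rw [if_pos hp]) (by simp [h1']) (by simp [h2'])
      · exact hcut _ (by rw [if_neg hp]) (by simp [h1']) (by simp [h2'])
      · rw [hbufsucc]; exact ih (i+1) _ parts start (by omega) (by omega)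

-- ===== VERDICT (by name: the statement is the Claim_ definition above) =====
theorem split_at_depth_spec : Claim_equal_split_at_depth := by
  intro s sep _ hpre
  unfold Spec_split_at_depth split_at_depth split_at_depth_alt
  have H : sep.toList ≠ [] ∨ ∀ c ∈ s.toList, c = '[' ∨ c = '(' ∨ c = ')' ∨ c = ']' := by
    rcases hpre with hne | hall
    · left; intro hnil; exact hne (by simpa using congrArg String.ofList hnil)
    · right; exact hall
  have hmain := loop_eq s.toList sep.toList H (s.toList.length + 1) 0 0 [] 0 (le_refl 0) (by omega)
  simpa using hmain
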